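-- pv_equiv track=rewrite | github.com/nsgxi43/Reta-AI | backend/services/renderer.py | render_listing_response
-- ===== SOURCE A (Python) =====
-- def render_listing_response(products, category_name: str = "products"):
--     """Render list of products for listing queries."""
--     if not products:
--         return f"Sorry, no {category_name} found in stock right now."
--
--     lines = []
--     lines.append(f"Available {category_name} ({len(products)} varieties):\n")
--
--     # Group by brand for better readability
--     by_brand = {}
--     for p in products:
--         brand = p.get("brand", "Unknown")
--         if brand not in by_brand:
--             by_brand[brand] = []
--         by_brand[brand].append(p)
--
--     # Format listings
--     for brand, brand_prods in sorted(by_brand.items()):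
--         lines.append(f"{brand}:")
--         for p in brand_prods[:3]:  # Max 3 per brand to avoid clutter
--             name = p.get("product_name", "N/A")
--             price = p.get("price_inr", "N/A")
--             zone = p.get("assigned_color", "Unknown")
--             lines.append(f"  • {name} - Rs {price} ({zone} zone)")
--         if len(brand_prods) > 3:
--             lines.append(f"  ... and {len(brand_prods) - 3} more variants")
--         lines.append("")  # Space between brands
--
--     return "\n".join(lines)
-- ===== SOURCE B (Python) =====
-- def render_listing_response(products, category_name: str = "products"):
--     """Render list of products for listing queries (brand blocks built by filter over sorted distinct brands)."""
--     if not products: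
--         return f"Sorry, no {category_name} found in stock right now."
--
--     def brand_of(p):
--         return p.get("brand", "Unknown")
--
--     def block(brand):
--         bp = [p for p in products if brand_of(p) == brand]
--         out = [f"{brand}:"]
--         out += [
--             f"  • {p.get('product_name', 'N/A')} - Rs {p.get('price_inr', 'N/A')} ({p.get('assigned_color', 'Unknown')} zone)"
--             for p in bp[:3]
--         ]
--         if len(bp) > 3:
--             out.append(f"  ... and {len(bp) - 3} more variants")
--         out.append("")
--         return out
--
--     header = f"Available {category_name} ({len(products)} varieties):\n"
--     body = [line for brand in sorted({brand_of(p) for p in products}) for line in block(brand)]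
--     return "\n".join([header] + body)
-- ===== Notes on version B (the rewrite author's own statement) =====
-- stated objective: simpler
-- what changed: Replaces A's dict-grouping pass plus nested line-appending loops by a flat pipeline: sort the distinct brands, then build each brand's block with a single filter/slice comprehension and join once.
import Mathlib
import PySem

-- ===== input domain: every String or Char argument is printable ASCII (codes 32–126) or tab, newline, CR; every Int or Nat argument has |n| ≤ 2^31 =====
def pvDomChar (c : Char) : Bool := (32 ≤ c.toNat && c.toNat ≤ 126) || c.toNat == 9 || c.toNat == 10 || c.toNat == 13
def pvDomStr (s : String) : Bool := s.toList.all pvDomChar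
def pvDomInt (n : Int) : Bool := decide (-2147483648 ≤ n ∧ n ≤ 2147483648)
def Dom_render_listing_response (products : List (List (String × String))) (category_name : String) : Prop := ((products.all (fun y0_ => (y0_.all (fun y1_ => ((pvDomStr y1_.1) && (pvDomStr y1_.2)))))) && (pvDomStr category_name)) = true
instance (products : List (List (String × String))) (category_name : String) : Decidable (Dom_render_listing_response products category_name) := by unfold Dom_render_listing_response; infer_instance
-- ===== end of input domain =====

-- B drops A's dict-grouping pass: it sorts the distinct brands and builds each brand's block with a
-- filter over the input; objective: simpler; same return value (no speed claim).

-- shared field accessors: p.get(k, default) on a product dict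
def pvBrand (p : List (String × String)) : String :=
  (PySem.Dict.ofList p).getD "brand" "Unknown"

def pvFmt (p : List (String × String)) : String :=
  "  • " ++ (PySem.Dict.ofList p).getD "product_name" "N/A" ++ " - Rs " ++
    (PySem.Dict.ofList p).getD "price_inr" "N/A" ++ " (" ++
    (PySem.Dict.ofList p).getD "assigned_color" "Unknown" ++ " zone)"

-- ===== PORT A =====
def render_listing_response (products : List (List (String × String))) (category_name : String) : String :=
  if products = [] then
    "Sorry, no " ++ category_name ++ " found in stock right now."
  else
    let lines : List String := []
    let lines := lines ++ ["Available " ++ category_name ++ " (" ++ PySem.Int.toStr (products.length : Int) ++ " varieties):\n"]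
    -- 'if brand not in by_brand: by_brand[brand] = []' then '.append(p)' = modify brand [] (· ++ [p])
    let by_brand : PySem.Dict String (List (List (String × String))) :=
      products.foldl (fun d p => d.modify (pvBrand p) [] (fun l => l ++ [p])) PySem.Dict.empty
    -- sorted(by_brand.items()): dict keys are unique, so Python's tuple comparison is decided by the
    -- brand alone — ported keyed on the first component; exact here
    let lines := (PySem.List.sorted by_brand.items (fun kv => kv.1) false).foldl
      (fun lines kv =>
        let lines := lines ++ [kv.1 ++ ":"]
        let lines := (PySem.List.slice kv.2 none (some 3)).foldl (fun lines p => lines ++ [pvFmt p]) lines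
        let lines := if kv.2.length > 3 then
            lines ++ ["  ... and " ++ PySem.Int.toStr ((kv.2.length : Int) - 3) ++ " more variants"]
          else lines
        lines ++ [""]) lines
    PySem.Str.join "\n" lines

-- ===== PORT B =====
def pvBlock (products : List (List (String × String))) (brand : String) : List String :=
  let bp := products.filter (fun p => pvBrand p == brand)
  [brand ++ ":"]
    ++ (bp.take 3).map pvFmt
    ++ (if bp.length > 3 then
          ["  ... and " ++ PySem.Int.toStr ((bp.length : Int) - 3) ++ " more variants"]
        else [])
    ++ [""]

def render_listing_response_alt (products : List (List (String × String))) (category_name : String) : String :=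
  if products = [] then
    "Sorry, no " ++ category_name ++ " found in stock right now."
  else
    let header := "Available " ++ category_name ++ " (" ++ PySem.Int.toStr (products.length : Int) ++ " varieties):\n"
    let body := (PySem.List.sorted (PySem.Set.ofList (products.map pvBrand)) (fun b => b) false).flatMap (pvBlock products)
    PySem.Str.join "\n" ([header] ++ body)

-- ===== PRECONDITION & SPEC =====
def Spec_render_listing_response (products : List (List (String × String))) (category_name : String) (out : String) : Prop := out = render_listing_response_alt products category_name
instance (products : List (List (String × String))) (category_name : String) (out : String) : Decidable (Spec_render_listing_response products category_name out) := by unfold Spec_render_listing_response; infer_instance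

-- ===== CLAIM (what is proved, stated in full; the proofs are below) =====
def Claim_equal_render_listing_response : Prop := ∀ (products : List (List (String × String))) (category_name : String), Dom_render_listing_response products category_name → Spec_render_listing_response products category_name (render_listing_response products category_name)

-- ===== LEMMAS AND PROOFS =====

-- a dict with Nodup keys is determined by lookups: items = keys paired with getD
lemma pv_items_eq_keys_map {κ ν : Type} [BEq κ] [LawfulBEq κ] (d : PySem.Dict κ ν) (d0 : ν)
    (h : d.keys.Nodup) : d.items = d.keys.map (fun k => (k, d.getD k d0)) := by
  obtain ⟨l⟩ := d
  induction l with
  | nil => simp [PySem.Dict.keys_mk]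
  | cons hd t ih =>
    obtain ⟨k, v⟩ := hd
    simp only [PySem.Dict.keys_mk, List.map_cons, List.nodup_cons, List.mem_map] at h
    show (k, v) :: t = ((k, PySem.Dict.getD ⟨(k,v)::t⟩ k d0) :: (t.map (fun x => x.1)).map (fun k' => (k', PySem.Dict.getD ⟨(k,v)::t⟩ k' d0)))
    rw [List.cons.injEq]
    refine ⟨?_, ?_⟩
    · simp [PySem.Dict.getD, PySem.Dict.get?_mk_cons]
    · have hrest := ih (by simpa [PySem.Dict.keys_mk] using h.2)
      simp only [PySem.Dict.keys_mk] at hrest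
      refine hrest.trans (List.map_congr_left ?_)
      intro x hx
      simp only [List.mem_map] at hx
      obtain ⟨q, hq, rfl⟩ := hx
      have hne : (k == q.1) = false := by
        by_cases hkq : k = q.1
        · exact absurd ⟨q, hq, hkq.symm⟩ h.1
        · simpa using hkq
      simp [PySem.Dict.getD, PySem.Dict.get?_mk_cons, hne]

-- the grouping dict's keys are the distinct brands in first-occurrence order
lemma pv_group_keys (products : List (List (String × String))) :
    ((products.foldl (fun d p => d.modify (pvBrand p) [] (fun l => l ++ [p])) PySem.Dict.empty).keys)
      = PySem.Set.ofList (products.map pvBrand) := by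
  rw [PySem.Dict.keys_foldl_modify_key products pvBrand [] (fun _ p => fun l => l ++ [p])]
  simp [PySem.Dict.empty, PySem.Dict.keys_mk, PySem.Set.update_nil_left]

-- the grouping dict's lookup is a filter of the input
lemma pv_group_getD (products : List (List (String × String))) (c : String) :
    ((products.foldl (fun d p => d.modify (pvBrand p) [] (fun l => l ++ [p])) PySem.Dict.empty).getD c [])
      = products.filter (fun p => pvBrand p == c) := by
  have h : products.foldl (fun d p => d.modify (pvBrand p) [] (fun l => l ++ [p])) PySem.Dict.empty
      = (products.map (fun p => (pvBrand p, p))).foldl (fun d q => d.modify q.1 [] (fun l => l ++ [q.2])) PySem.Dict.empty := by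
    rw [List.foldl_map]
  rw [h, PySem.Dict.getD_foldl_modify_append]
  simp [PySem.Dict.empty, PySem.Dict.getD, PySem.Dict.get?, List.filter_map, Function.comp_def]

-- sorted items = sorted distinct brands paired with their filtered groups
lemma pv_sorted_items (products : List (List (String × String))) :
    PySem.List.sorted
        ((products.foldl (fun d p => d.modify (pvBrand p) [] (fun l => l ++ [p])) PySem.Dict.empty).items)
        (fun kv => kv.1) false
      = (PySem.List.sorted (PySem.Set.ofList (products.map pvBrand)) (fun b => b) false).map
          (fun b => (b, products.filter (fun p => pvBrand p == b))) := by
  set d := products.foldl (fun d p => d.modify (pvBrand p) [] (fun l => l ++ [p])) PySem.Dict.empty with hd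
  have hkeys : d.keys = PySem.Set.ofList (products.map pvBrand) := pv_group_keys products
  have hnodup : d.keys.Nodup := by rw [hkeys]; exact PySem.Set.nodup_ofList _
  have hitems : d.items = d.keys.map (fun k => (k, products.filter (fun p => pvBrand p == k))) := by
    rw [pv_items_eq_keys_map d [] hnodup]
    exact List.map_congr_left (fun k _ => by rw [hd, pv_group_getD])
  apply PySem.List.sorted_eq_of_perm_of_pairwise_lt
  · rw [hitems, hkeys]
    exact (PySem.List.sorted_perm _ _ _).map _
  · rw [List.pairwise_map]
    exact PySem.List.sorted_ofList_pairwise_lt _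

-- one brand block as A's loop body emits it
def pvGA (kv : String × List (List (String × String))) : List String :=
  [kv.1 ++ ":"] ++ (PySem.List.slice kv.2 none (some 3)).map pvFmt
    ++ (if kv.2.length > 3 then
          ["  ... and " ++ PySem.Int.toStr ((kv.2.length : Int) - 3) ++ " more variants"]
        else [])
    ++ [""]

-- A's formatting loop appends one block per (brand, group) pair
lemma pv_loopA (kvs : List (String × List (List (String × String)))) (acc : List String) :
    List.foldl (fun lines kv =>
      (if kv.2.length > 3 then
          List.foldl (fun lines p => lines ++ [pvFmt p]) (lines ++ [kv.1 ++ ":"]) (PySem.List.slice kv.2 none (some 3))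
            ++ ["  ... and " ++ PySem.Int.toStr ((kv.2.length : Int) - 3) ++ " more variants"]
        else
          List.foldl (fun lines p => lines ++ [pvFmt p]) (lines ++ [kv.1 ++ ":"]) (PySem.List.slice kv.2 none (some 3)))
        ++ [""]) acc kvs
      = acc ++ kvs.flatMap pvGA := by
  induction kvs generalizing acc with
  | nil => simp
  | cons kv t ih =>
    rw [List.foldl_cons, ih, List.flatMap_cons]
    simp only [PySem.List.foldl_append_singleton_eq_map, pvGA]
    split_ifs <;> simp [List.append_assoc]

-- ===== VERDICT (by name: the statement is the Claim_ definition above) =====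
theorem render_listing_response_spec : Claim_equal_render_listing_response := by
  intro products category_name _
  unfold Spec_render_listing_response render_listing_response render_listing_response_alt
  by_cases hne : products = []
  · simp [hne]
  · rw [if_neg hne, if_neg hne]
    simp only [List.nil_append]
    rw [pv_loopA, pv_sorted_items, List.flatMap_map]
    congr 2
    congr 1
    funext b
    simp only [pvGA, pvBlock]
    rw [PySem.List.slice_to _ (by norm_num : (0:Int) ≤ 3)]
    have h3 : Int.toNat 3 = 3 := rfl
    rw [h3]
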